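-- pv_equiv track=rewrite | github.com/nismod/open-gira | workflow/scripts/plot_damage_distributions.py | near_square_layout
-- ===== SOURCE A (Python) =====
-- def closest_factors(n: int) -> tuple[tuple[int, int], int]:
--     """
--     Find the pair of natural numbers which factorise `n` and are closest to one another.
--
--     Arguments:
--         n (int): Number to factorise
--
--     Returns:
--         tuple[int, int]: Closest natural number factors
--         int: Gap between these two factors
--     """
--
--     smallest_gap = n
--     closest_factors = (1, n)
--
--     for i in range(1, n + 1):
--         for j in range(1, n + 1):
--             if i * j == n:
--                 gap = abs(i - j)
--                 if gap < smallest_gap: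
--                     smallest_gap = gap
--                     closest_factors = (i, j)
--
--     return closest_factors, smallest_gap
--
-- def near_square_layout(n: int) -> tuple[int, int]:
--     """
--     Compute nearly square 2D grid shape with a number of cells equal to or narrowly in excess of `n`.
--
--     Arguments:
--         n (int): Number of items to accomodate
--
--     Returns:
--         tuple[int, int]: Suggested x, y layout
--     """
--
--     MAX_EMPTY_CELLS = 3
--     optimum = (1, n)
--
--     for i in range(n, n + MAX_EMPTY_CELLS + 1):
--         factors, gap = closest_factors(i)
--         if gap < abs(optimum[0] - optimum[1]):
--             optimum = factors
--
--     # return larger then smaller (prefer landscape for x,y addressing)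
--     return tuple(sorted(optimum, reverse=True))
-- ===== SOURCE B (Python) =====
-- def _closest_factors_fast(m):
--     # largest divisor a of m with a*a <= m, by trial division up to sqrt(m)
--     a = 1
--     i = 1
--     while i * i <= m:
--         if m % i == 0:
--             a = i
--         i += 1
--     b = m // a
--     return a, b
--
--
-- def near_square_layout(n):
--     best = (n, 1)       # (larger, smaller)
--     best_gap = n - 1
--     for m in range(n, n + 4):
--         a, b = _closest_factors_fast(m)
--         if b - a < best_gap:
--             best = (b, a)
--             best_gap = b - a
--     return best
-- ===== Notes on version B (the rewrite author's own statement) =====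
-- stated objective: faster
-- what changed: Replaces the O(i^2) nested search for each candidate i (all pairs j,k in [1,i]^2 with j*k==i) by trial division up to sqrt(i), keeping the largest divisor a <= sqrt(i) and pairing it with i//a, and tracks the running best (larger, smaller) pair directly instead of re-sorting at the end.
-- outside the precondition, e.g. on near_square_layout(-5): A returns (1, -2), B returns (-5, 1); on near_square_layout(0): A returns (1, 1), B returns (0, 1)
import Mathlib
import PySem

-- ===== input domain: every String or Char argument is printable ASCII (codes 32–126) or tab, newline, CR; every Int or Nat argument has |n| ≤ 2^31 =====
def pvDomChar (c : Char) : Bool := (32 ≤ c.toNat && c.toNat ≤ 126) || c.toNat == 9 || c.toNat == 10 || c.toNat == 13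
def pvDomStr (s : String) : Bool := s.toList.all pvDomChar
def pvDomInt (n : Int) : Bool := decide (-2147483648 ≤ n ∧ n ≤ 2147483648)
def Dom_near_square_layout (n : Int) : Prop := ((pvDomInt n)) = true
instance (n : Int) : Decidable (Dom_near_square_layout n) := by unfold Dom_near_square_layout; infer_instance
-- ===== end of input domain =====

-- B replaces A's per-candidate all-pairs search by trial division up to sqrt (objective: faster).

-- ===== PORT A =====
def closest_factors (n : Int) : (Int × Int) × Int :=
  let st := (PySem.List.pyRange 1 (n + 1) 1).foldl (fun st i =>
    (PySem.List.pyRange 1 (n + 1) 1).foldl (fun st j =>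
      if i * j = n then
        let gap := |i - j|
        if gap < st.1 then (gap, (i, j)) else st
      else st) st) (n, (1, n))
  (st.2, st.1)

def near_square_layout (n : Int) : List Int :=
  let optimum := (PySem.List.pyRange n (n + 3 + 1) 1).foldl (fun optimum i =>
    let fg := closest_factors i
    if fg.2 < |optimum.1 - optimum.2| then fg.1 else optimum) (1, n)
  PySem.List.sorted [optimum.1, optimum.2] (fun x => x) true

-- ===== PORT B =====
-- the 'while i * i <= m' trial-division loop of Source B
def trialLoop (m i a : Int) : Int :=
  if _h : i * i ≤ m then
    trialLoop m (i + 1) (if PySem.Int.mod m i = 0 then i else a)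
  else a
termination_by (m + 1 - i).toNat
decreasing_by
  have hii : i ≤ i * i := by rcases Int.lt_or_le i 1 with h | h <;> nlinarith
  omega

def closest_factors_fast (m : Int) : Int × Int :=
  let a := trialLoop m 1 1
  (a, PySem.Int.floordiv m a)

def near_square_layout_alt (n : Int) : List Int :=
  let st := (PySem.List.pyRange n (n + 4) 1).foldl (fun st m =>
    let ab := closest_factors_fast m
    if ab.2 - ab.1 < st.2 then ((ab.2, ab.1), ab.2 - ab.1) else st)
    ((n, 1), n - 1)
  [st.1.1, st.1.2]

-- ===== PRECONDITION & SPEC =====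
-- Pre_ restricts to the function's natural domain, a positive number of items to lay out:
-- for n ≤ 0 no grid exists and neither program's returned pair is specified — A's and B's
-- (differing) values there are both accidental initial values no caller would rely on.
def Pre_near_square_layout (n : Int) : Prop := 1 ≤ n
instance (n : Int) : Decidable (Pre_near_square_layout n) := by unfold Pre_near_square_layout; infer_instance
def pvWitness_near_square_layout : Int := (6)

def Spec_near_square_layout (n : Int) (out : List Int) : Prop := out = near_square_layout_alt n
instance (n : Int) (out : List Int) : Decidable (Spec_near_square_layout n out) := by unfold Spec_near_square_layout; infer_instance

-- ===== CLAIM (what is proved, stated in full; the proofs are below) =====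
def Claim_equal_near_square_layout : Prop := ∀ (n : Int), Dom_near_square_layout n → Pre_near_square_layout n → Spec_near_square_layout n (near_square_layout n)

-- ===== LEMMAS AND PROOFS =====

-- the value both programs converge on: the largest divisor not exceeding the square root
def IsMaxSqrtDiv (m a : Int) : Prop :=
  a ∣ m ∧ 1 ≤ a ∧ a * a ≤ m ∧ ∀ d, 1 ≤ d → d ∣ m → d * d ≤ m → d ≤ a

theorem isMaxSqrtDiv_unique (m a b : Int) (ha : IsMaxSqrtDiv m a) (hb : IsMaxSqrtDiv m b) : a = b := by
  obtain ⟨ha1, ha2, ha3, ha4⟩ := ha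
  obtain ⟨hb1, hb2, hb3, hb4⟩ := hb
  exact le_antisymm (hb4 a ha2 ha1 ha3) (ha4 b hb2 hb1 hb3)

theorem foldl_fix {α β : Type} (f : β → α → β) (l : List α) (s : β)
    (h : ∀ x ∈ l, ∀ t, f t x = t) : l.foldl f s = s := by
  induction l generalizing s with
  | nil => rfl
  | cons x xs ih =>
    simp only [List.foldl_cons, h x (by simp)]
    exact ih s (fun y hy t => h y (by simp [hy]) t)

theorem trialLoop_spec (m : Int) (hm : 1 ≤ m) :
    ∀ (i a : Int), 1 ≤ i → 1 ≤ a → a ∣ m → a * a ≤ m →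
      (∀ d, 1 ≤ d → d < i → d ∣ m → d ≤ a) → IsMaxSqrtDiv m (trialLoop m i a) := by
  suffices H : ∀ (k : Nat) (i a : Int), (m + 1 - i).toNat = k → 1 ≤ i → 1 ≤ a → a ∣ m →
      a * a ≤ m → (∀ d, 1 ≤ d → d < i → d ∣ m → d ≤ a) → IsMaxSqrtDiv m (trialLoop m i a) from
    fun i a hi ha had hasq hmax => H _ i a rfl hi ha had hasq hmax
  intro k
  induction k using Nat.strong_induction_on with
  | _ k ih =>
    intro i a hk hi ha had hasq hmax
    rw [trialLoop]
    split_ifs with h1 h2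
    · have hdvd : i ∣ m := (PySem.Int.mod_eq_zero_iff_dvd m i).mp h2
      have him : i ≤ m := by nlinarith
      exact ih (m + 1 - (i + 1)).toNat (by omega) (i + 1) i rfl (by omega) hi hdvd h1
        (fun d _ hd2 _ => by omega)
    · have hndvd : ¬ i ∣ m := fun hd => h2 ((PySem.Int.mod_eq_zero_iff_dvd m i).mpr hd)
      have him : i ≤ m := by nlinarith
      refine ih (m + 1 - (i + 1)).toNat (by omega) (i + 1) a rfl (by omega) ha had hasq ?_
      intro d hd1 hd2 hd3
      rcases eq_or_lt_of_le (show d ≤ i by omega) with he | hlt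
      · exact absurd (he ▸ hd3) hndvd
      · exact hmax d hd1 hlt hd3
    · exact ⟨had, ha, hasq, fun d hd1 hd2 hd3 => hmax d hd1 (by nlinarith) hd2⟩

-- the inner 'for j' loop of closest_factors fires exactly at j = n / i when i divides n
theorem inner_eq (n i : Int) (hn : 1 ≤ n) (hi : 1 ≤ i) (hin : i ≤ n) (st : Int × (Int × Int)) :
    (PySem.List.pyRange 1 (n + 1) 1).foldl
      (fun st j => if i * j = n then
          let gap := |i - j|
          if gap < st.1 then (gap, (i, j)) else st
        else st) st
    = if i ∣ n then
        (let gap := |i - n / i|; if gap < st.1 then (gap, (i, n / i)) else st)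
      else st := by
  by_cases hdvd : i ∣ n
  · have hij0 : i * (n / i) = n := Int.mul_ediv_cancel' hdvd
    have h1j0 : 1 ≤ n / i := by
      by_contra h
      push_neg at h
      nlinarith
    have hj0n : n / i ≤ n := by nlinarith
    rw [if_pos hdvd]
    rw [PySem.List.pyRange_one_append 1 (n / i) (n + 1) (by omega) (by omega),
        PySem.List.pyRange_one_cons (show n / i < n + 1 by omega),
        List.foldl_append, List.foldl_cons]
    have hA : (PySem.List.pyRange 1 (n / i) 1).foldl
        (fun st j => if i * j = n then
          let gap := |i - j|
          if gap < st.1 then (gap, (i, j)) else st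
        else st) st = st := by
      apply foldl_fix
      intro j hj t
      rcases (PySem.List.mem_pyRange_one).mp hj with ⟨hj1, hj2⟩
      rw [if_neg]
      intro he; nlinarith
    rw [hA, if_pos hij0]
    apply foldl_fix
    intro j hj t
    rcases (PySem.List.mem_pyRange_one).mp hj with ⟨hj1, hj2⟩
    rw [if_neg]
    intro he; nlinarith
  · rw [if_neg hdvd]
    apply foldl_fix
    intro j hj t
    rw [if_neg]
    intro he; exact hdvd ⟨j, he.symm⟩

-- invariant of closest_factors' outer 'for i' loop over the prefix 1..k, k = 1 + j
theorem outer_inv (n : Int) (hn : 1 ≤ n) :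
    ∀ (j : Nat), 1 + (j : Int) ≤ n →
    ∃ a, a ∣ n ∧ 1 ≤ a ∧ a * a ≤ n ∧ a ≤ 1 + (j : Int) ∧
      (∀ d, 1 ≤ d → d ≤ 1 + (j : Int) → d ∣ n → d * d ≤ n → d ≤ a) ∧
      (PySem.List.pyRange 1 (1 + (j : Int) + 1) 1).foldl
        (fun st i => (PySem.List.pyRange 1 (n + 1) 1).foldl
          (fun st j => if i * j = n then
            let gap := |i - j|
            if gap < st.1 then (gap, (i, j)) else st
          else st) st)
        (n, (1, n)) = (n / a - a, (a, n / a)) := by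
  intro j
  induction j with
  | zero =>
    intro hkn
    simp only [Nat.cast_zero, add_zero] at *
    refine ⟨1, one_dvd n, le_rfl, by nlinarith, le_rfl, fun d hd1 hd2 _ _ => by omega, ?_⟩
    rw [PySem.List.pyRange_one_singleton, List.foldl_cons, List.foldl_nil]
    rw [inner_eq n 1 hn le_rfl hn, if_pos (one_dvd n)]
    simp only [Int.ediv_one]
    have habs : |1 - n| = n - 1 := by
      rw [abs_sub_comm]; exact abs_of_nonneg (by omega)
    rw [habs, if_pos (by omega)]
  | succ j ihj =>
    intro hkn
    have hc : (1 : Int) + ((j + 1 : Nat) : Int) = 1 + (j : Int) + 1 := by push_cast; ring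
    rw [hc] at *
    set K := 1 + (j : Int) with hK
    obtain ⟨a, ha1, ha2, ha3, ha4, ha5, heq⟩ := ihj (by omega)
    have h1K : 1 ≤ K := by omega
    rw [PySem.List.pyRange_one_succ_right (show (1 : Int) ≤ K + 1 by omega),
        List.foldl_append, heq, List.foldl_cons, List.foldl_nil]
    rw [inner_eq n (K + 1) hn (by omega) (by omega)]
    by_cases hdvd : (K + 1) ∣ n
    · rw [if_pos hdvd]
      have hcanK : (K + 1) * (n / (K + 1)) = n := Int.mul_ediv_cancel' hdvd
      have hcana : a * (n / a) = n := Int.mul_ediv_cancel' ha1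
      have h1j0 : 1 ≤ n / (K + 1) := by
        by_contra h
        push_neg at h
        nlinarith
      by_cases hsq : (K + 1) * (K + 1) ≤ n
      · -- new best divisor K+1
        have hKj0 : K + 1 ≤ n / (K + 1) := by nlinarith
        have habs : |K + 1 - n / (K + 1)| = n / (K + 1) - (K + 1) := by
          rw [abs_sub_comm]; exact abs_of_nonneg (by omega)
        have hlt : n / (K + 1) < n / a := by
          by_contra h
          push_neg at h
          nlinarith
        rw [habs, if_pos (by omega)]
        exact ⟨K + 1, hdvd, by omega, hsq, le_rfl, fun d _ hd2 _ _ => hd2, rfl⟩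
      · -- past the square root: the mirror divisor n/(K+1) was already seen
        push_neg at hsq
        have hj0K : n / (K + 1) < K + 1 := by nlinarith
        have habs : |K + 1 - n / (K + 1)| = K + 1 - n / (K + 1) :=
          abs_of_nonneg (by omega)
        have hj0dvd : (n / (K + 1)) ∣ n := ⟨K + 1, by linarith [hcanK, mul_comm (K + 1) (n / (K + 1))]⟩
        have hj0sq : (n / (K + 1)) * (n / (K + 1)) ≤ n := by nlinarith
        have hj0a : n / (K + 1) ≤ a := ha5 _ h1j0 (by omega) hj0dvd hj0sq
        have hnak : n / a ≤ K + 1 := by nlinarith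
        rw [habs, if_neg (by omega)]
        refine ⟨a, ha1, ha2, ha3, by omega, ?_, rfl⟩
        intro d hd1 hd2 hd3 hd4
        rcases eq_or_lt_of_le (show d ≤ K + 1 by omega) with he | hlt
        · exfalso; rw [he] at hd4; omega
        · exact ha5 d hd1 (by omega) hd3 hd4
    · rw [if_neg hdvd]
      refine ⟨a, ha1, ha2, ha3, by omega, ?_, rfl⟩
      intro d hd1 hd2 hd3 hd4
      rcases eq_or_lt_of_le (show d ≤ K + 1 by omega) with he | hlt
      · exact absurd (he ▸ hd3) hdvd
      · exact ha5 d hd1 (by omega) hd3 hd4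

theorem closest_factors_char (n : Int) (hn : 1 ≤ n) :
    ∃ a, IsMaxSqrtDiv n a ∧ closest_factors n = ((a, n / a), n / a - a) := by
  obtain ⟨a, h1, h2, h3, _, h5, heq⟩ := outer_inv n hn (n - 1).toNat (by omega)
  have hcast : (1 : Int) + ((n - 1).toNat : Int) = n := by omega
  rw [hcast] at heq
  refine ⟨a, ⟨h1, h2, h3, fun d hd1 hd2 hd3 =>
    h5 d hd1 (by have := Int.le_of_dvd (by omega) hd2; omega) hd2 hd3⟩, ?_⟩
  simp only [closest_factors]
  rw [heq]

theorem cf_eq (m : Int) (hm : 1 ≤ m) :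
    ∃ a b : Int, a ≤ b ∧ closest_factors m = ((a, b), b - a) ∧ closest_factors_fast m = (a, b) := by
  obtain ⟨a, hmax, heq⟩ := closest_factors_char m hm
  have ht := trialLoop_spec m hm 1 1 le_rfl le_rfl (one_dvd m) (by nlinarith)
    (fun d _ hd2 _ => by omega)
  have hta : trialLoop m 1 1 = a := isMaxSqrtDiv_unique m _ a ht hmax
  obtain ⟨ha1, ha2, ha3, _⟩ := hmax
  have hcancel : a * (m / a) = m := Int.mul_ediv_cancel' ha1
  refine ⟨a, m / a, by nlinarith, heq, ?_⟩
  simp only [closest_factors_fast]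
  rw [hta, PySem.Int.floordiv_eq_ediv_of_pos (by omega)]

-- the two outer folds over the candidate sizes stay in lock-step
theorem fold_rel (l : List Int) (hl : ∀ m ∈ l, 1 ≤ m) :
    ∀ p q : Int, p ≤ q →
    ∃ p' q', p' ≤ q' ∧
      l.foldl (fun optimum i =>
        let fg := closest_factors i
        if fg.2 < |optimum.1 - optimum.2| then fg.1 else optimum) (p, q) = (p', q') ∧
      l.foldl (fun st m =>
        let ab := closest_factors_fast m
        if ab.2 - ab.1 < st.2 then ((ab.2, ab.1), ab.2 - ab.1) else st) ((q, p), q - p)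
        = ((q', p'), q' - p') := by
  induction l with
  | nil => exact fun p q h => ⟨p, q, h, rfl, rfl⟩
  | cons m t ih =>
    intro p q hpq
    obtain ⟨a, b, hab, hcf, hcff⟩ := cf_eq m (hl m (by simp))
    have hl' : ∀ x ∈ t, 1 ≤ x := fun x hx => hl x (by simp [hx])
    have habs : |p - q| = q - p := by
      rw [abs_sub_comm]; exact abs_of_nonneg (by omega)
    simp only [List.foldl_cons, hcf, hcff, habs]
    by_cases hc : b - a < q - p
    · rw [if_pos hc, if_pos hc]
      exact ih hl' a b hab
    · rw [if_neg hc, if_neg hc]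
      exact ih hl' p q hpq

theorem sorted_two (p q : Int) (h : p ≤ q) :
    PySem.List.sorted [p, q] (fun x => x) true = [q, p] := by
  rcases eq_or_lt_of_le h with he | hlt
  · subst he
    apply PySem.List.sorted_rev_eq_self_of_pairwise
    refine List.Pairwise.cons ?_ (List.pairwise_singleton _ _)
    intro b hb
    simp only [List.mem_singleton] at hb
    subst hb
    exact le_rfl
  · apply PySem.List.sorted_rev_eq_of_perm_of_pairwise_gt <;>
      first
        | exact List.Perm.swap p q []
        | exact (List.Perm.swap p q []).symm
        | (refine List.Pairwise.cons ?_ (List.pairwise_singleton _ _);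
           intro b hb; simp only [List.mem_singleton] at hb; subst hb; exact hlt)

theorem ports_agree (n : Int) (hn : 1 ≤ n) : near_square_layout n = near_square_layout_alt n := by
  have hr : n + 3 + 1 = n + 4 := by ring
  have hrange : PySem.List.pyRange n (n + 4) 1 = [n, n + 1, n + 2, n + 3] := by
    rw [PySem.List.pyRange_one_cons (by omega), PySem.List.pyRange_one_cons (by omega),
        PySem.List.pyRange_one_cons (by omega), PySem.List.pyRange_one_cons (by omega),
        PySem.List.pyRange_one_eq_nil (by omega)]
    norm_num
    omega
  obtain ⟨p', q', hle, hA, hB⟩ := fold_rel [n, n + 1, n + 2, n + 3]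
    (by intro m hm; fin_cases hm <;> omega) 1 n hn
  simp only [near_square_layout, near_square_layout_alt, hr, hrange]
  rw [hA, hB, sorted_two p' q' hle]

-- ===== VERDICT (by name: the statement is the Claim_ definition above) =====
theorem near_square_layout_spec : Claim_equal_near_square_layout := by
  intro n _ hpre
  unfold Spec_near_square_layout
  exact ports_agree n hpre
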